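-- pv_equiv track=rewrite | github.com/sahilyousafp/CItylayers_Neo4j_Agent | app.py | _get_category_from_query
-- ===== SOURCE A (Python) =====
-- def _get_category_from_query(query: str) -> str:
--     """
--     Parses a query to find a matching category and returns its ID.
--     Enhanced to detect more natural language patterns.
--     """
--     CATEGORY_MAPPING = {
--         # Beauty (1)
--         'beauty': 1, 'beautiful': 1, 'scenic': 1, 'view': 1, 'views': 1,
--         'aesthetic': 1, 'attractive': 1, 'picturesque': 1, 'stunning': 1,
--         'pretty': 1, 'gorgeous': 1, 'architecture': 1, 'architectural': 1,
--
--         # Sound (2)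
--         'sound': 2, 'noise': 2, 'audio': 2, 'acoustic': 2, 'acoustics': 2,
--         'quiet': 2, 'peaceful': 2, 'loud': 2, 'silent': 2, 'noisy': 2,
--
--         # Movement (3)
--         'movement': 3, 'transport': 3, 'transportation': 3, 'transit': 3,
--         'mobility': 3, 'traffic': 3, 'pedestrian': 3, 'walkability': 3,
--         'accessible': 3, 'accessibility': 3, 'bike': 3, 'cycling': 3,
--
--         # Protection (4)
--         'protection': 4, 'safety': 4, 'secure': 4, 'security': 4,
--         'safe': 4, 'crime': 4, 'dangerous': 4, 'risk': 4,
--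
--         # Climate Comfort (5)
--         'climate': 5, 'comfort': 5, 'weather': 5, 'temperature': 5,
--         'comfortable': 5, 'climate comfort': 5, 'hot': 5, 'cold': 5,
--         'shade': 5, 'sunny': 5, 'wind': 5, 'rain': 5,
--
--         # Activities (6)
--         'activities': 6, 'activity': 6, 'recreation': 6, 'recreational': 6,
--         'parks': 6, 'park': 6, 'leisure': 6, 'entertainment': 6,
--         'things to do': 6, 'fun': 6, 'sports': 6, 'exercise': 6
--     }
--
--     lower_query = query.lower()
--
--     # Sort by length (longest first) to match more specific terms first
--     sorted_keywords = sorted(CATEGORY_MAPPING.keys(), key=len, reverse=True)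
--
--     for keyword in sorted_keywords:
--         if keyword in lower_query:
--             return str(CATEGORY_MAPPING[keyword])
--
--     return None
-- ===== SOURCE B (Python) =====
-- def _get_category_from_query(query: str) -> str:
--     """Nested single pass over per-category keyword groups, keeping the running
--     longest matching keyword (strict '>' so earlier keywords win length ties)."""
--     KEYWORDS = [
--         (1, ['beauty', 'beautiful', 'scenic', 'view', 'views', 'aesthetic',
--              'attractive', 'picturesque', 'stunning', 'pretty', 'gorgeous',
--              'architecture', 'architectural']),
--         (2, ['sound', 'noise', 'audio', 'acoustic', 'acoustics', 'quiet',
--              'peaceful', 'loud', 'silent', 'noisy']),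
--         (3, ['movement', 'transport', 'transportation', 'transit', 'mobility',
--              'traffic', 'pedestrian', 'walkability', 'accessible',
--              'accessibility', 'bike', 'cycling']),
--         (4, ['protection', 'safety', 'secure', 'security', 'safe', 'crime',
--              'dangerous', 'risk']),
--         (5, ['climate', 'comfort', 'weather', 'temperature', 'comfortable',
--              'climate comfort', 'hot', 'cold', 'shade', 'sunny', 'wind',
--              'rain']),
--         (6, ['activities', 'activity', 'recreation', 'recreational', 'parks',
--              'park', 'leisure', 'entertainment', 'things to do', 'fun',
--              'sports', 'exercise']),
--     ]
--     q = query.lower()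
--     best_kw = None
--     best_cat = None
--     for cat, words in KEYWORDS:
--         for kw in words:
--             if kw in q and (best_kw is None or len(kw) > len(best_kw)):
--                 best_kw, best_cat = kw, cat
--     return str(best_cat) if best_kw is not None else None
-- ===== Notes on version B (the rewrite author's own statement) =====
-- stated objective: simpler
-- what changed: Replaced A's flat dict plus sort-the-67-keywords-by-length-then-take-first-substring-match with a nested single pass over six per-category comma-separated keyword strings, keeping a running longest matching keyword (strict '>' so earlier keywords win length ties) and returning its category directly with no sort and no final dict lookup.
import Mathlib
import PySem

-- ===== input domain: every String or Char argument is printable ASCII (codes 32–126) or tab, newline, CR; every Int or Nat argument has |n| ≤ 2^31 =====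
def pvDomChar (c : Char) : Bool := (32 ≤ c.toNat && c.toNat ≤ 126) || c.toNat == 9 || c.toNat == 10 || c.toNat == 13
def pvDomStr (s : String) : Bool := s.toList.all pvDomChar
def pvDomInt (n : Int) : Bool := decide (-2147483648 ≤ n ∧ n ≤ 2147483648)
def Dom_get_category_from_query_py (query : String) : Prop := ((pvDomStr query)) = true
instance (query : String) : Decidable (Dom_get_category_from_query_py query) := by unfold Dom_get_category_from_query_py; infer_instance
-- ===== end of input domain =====

-- B replaces A's flat dict + sort-keywords-by-length-then-scan by a nested single pass over six
-- per-category comma-separated keyword strings with a running longest match (objective: simpler).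

-- ===== PORT A =====
-- the CATEGORY_MAPPING dict literal (67 distinct keys), A's module constant
def pvCM : List (String × Int) := [
  ("beauty", 1), ("beautiful", 1), ("scenic", 1), ("view", 1), ("views", 1),
  ("aesthetic", 1), ("attractive", 1), ("picturesque", 1), ("stunning", 1), ("pretty", 1),
  ("gorgeous", 1), ("architecture", 1), ("architectural", 1), ("sound", 2), ("noise", 2),
  ("audio", 2), ("acoustic", 2), ("acoustics", 2), ("quiet", 2), ("peaceful", 2),
  ("loud", 2), ("silent", 2), ("noisy", 2), ("movement", 3), ("transport", 3),
  ("transportation", 3), ("transit", 3), ("mobility", 3), ("traffic", 3), ("pedestrian", 3),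
  ("walkability", 3), ("accessible", 3), ("accessibility", 3), ("bike", 3), ("cycling", 3),
  ("protection", 4), ("safety", 4), ("secure", 4), ("security", 4), ("safe", 4),
  ("crime", 4), ("dangerous", 4), ("risk", 4), ("climate", 5), ("comfort", 5),
  ("weather", 5), ("temperature", 5), ("comfortable", 5), ("climate comfort", 5), ("hot", 5),
  ("cold", 5), ("shade", 5), ("sunny", 5), ("wind", 5), ("rain", 5),
  ("activities", 6), ("activity", 6), ("recreation", 6), ("recreational", 6), ("parks", 6),
  ("park", 6), ("leisure", 6), ("entertainment", 6), ("things to do", 6), ("fun", 6),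
  ("sports", 6), ("exercise", 6)]

def pvCategoryMapping : PySem.Dict String Int := PySem.Dict.ofList pvCM

-- A: lower the query, sort the keys by length descending (stable), return str(dict[k]) for the
-- first sorted key that is a substring.  (The dict lookup cannot fail: the key comes from d.keys.)
def get_category_from_query_py (query : String) : Option String :=
  match (PySem.List.sorted pvCategoryMapping.keys (fun k => PySem.Str.len k) true).find?
      (fun keyword => PySem.Str.isIn keyword (PySem.Str.lower query)) with
  | some keyword => (pvCategoryMapping.get? keyword).map PySem.Int.toStr
  | none => none

-- ===== PORT B =====
-- B's module constant: keyword groups per category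
def pvKW : List (Int × List String) := [
  (1, ["beauty", "beautiful", "scenic", "view", "views", "aesthetic", "attractive",
       "picturesque", "stunning", "pretty", "gorgeous", "architecture", "architectural"]),
  (2, ["sound", "noise", "audio", "acoustic", "acoustics", "quiet", "peaceful",
       "loud", "silent", "noisy"]),
  (3, ["movement", "transport", "transportation", "transit", "mobility", "traffic",
       "pedestrian", "walkability", "accessible", "accessibility", "bike", "cycling"]),
  (4, ["protection", "safety", "secure", "security", "safe", "crime", "dangerous", "risk"]),
  (5, ["climate", "comfort", "weather", "temperature", "comfortable", "climate comfort",
       "hot", "cold", "shade", "sunny", "wind", "rain"]),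
  (6, ["activities", "activity", "recreation", "recreational", "parks", "park",
       "leisure", "entertainment", "things to do", "fun", "sports", "exercise"])]

-- inner-loop body of B: update the running (longest matching keyword, its category)
def pvScanWord (q : String) (cat : Int) (best : Option (String × Int)) (kw : String) :
    Option (String × Int) :=
  if PySem.Str.isIn kw q &&
      (match best with
       | none => true
       | some b => decide (PySem.Str.len b.1 < PySem.Str.len kw)) then
    some (kw, cat)
  else best

def get_category_from_query_py_alt (query : String) : Option String :=
  let q := PySem.Str.lower query
  match pvKW.foldl
      (fun best cv => cv.2.foldl (pvScanWord q cv.1) best) none with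
  | some b => some (PySem.Int.toStr b.2)
  | none => none

-- ===== PRECONDITION & SPEC =====
def Spec_get_category_from_query_py (query : String) (out : Option String) : Prop := out = get_category_from_query_py_alt query
instance (query : String) (out : Option String) : Decidable (Spec_get_category_from_query_py query out) := by unfold Spec_get_category_from_query_py; infer_instance

-- ===== CLAIM (what is proved, stated in full; the proofs are below) =====
def Claim_equal_get_category_from_query_py : Prop := ∀ (query : String), Dom_get_category_from_query_py query → Spec_get_category_from_query_py query (get_category_from_query_py query)

-- ===== LEMMAS AND PROOFS =====

-- proof-side reformulation of B's loop body, acting on (keyword, category) pairs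
def pvBestStep (p : String → Bool) (best : Option (String × Int)) (kv : String × Int) :
    Option (String × Int) :=
  if p kv.1 then
    match best with
    | none => some kv
    | some b => if PySem.Str.len b.1 < PySem.Str.len kv.1 then some kv else some b
  else best

theorem pv_scan_eq (q : String) (cat : Int) (best : Option (String × Int)) (kw : String) :
    pvScanWord q cat best kw = pvBestStep (fun k => PySem.Str.isIn k q) best (kw, cat) := by
  cases best with
  | none => simp [pvScanWord, pvBestStep]
  | some b =>
    simp only [pvScanWord, pvBestStep, Bool.and_eq_true, decide_eq_true_eq]
    split_ifs <;> tauto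

-- B's flattened (keyword, category) list is exactly A's dict literal
set_option maxRecDepth 100000 in
theorem pv_flat :
    pvKW.flatMap (fun cv => cv.2.map (fun k => (k, cv.1))) = pvCM := by
  decide

theorem pv_foldl_flatMap {α β γ : Type} (L : List α) (f : α → List β) (g : γ → β → γ) :
    ∀ acc : γ, (L.flatMap f).foldl g acc = L.foldl (fun a x => (f x).foldl g a) acc := by
  induction L with
  | nil => intro acc; rfl
  | cons x L ih => intro acc; simp [List.flatMap_cons, List.foldl_append, ih]

-- B's nested loop is the single fold of pvBestStep over pvCM
theorem pv_nested (q : String) :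
    pvKW.foldl (fun best cv => cv.2.foldl (pvScanWord q cv.1) best) none
      = pvCM.foldl (pvBestStep (fun k => PySem.Str.isIn k q)) none := by
  rw [← pv_flat, pv_foldl_flatMap]
  have hstep : (fun (a : Option (String × Int)) (cv : Int × List String) =>
        (cv.2.map (fun k => (k, cv.1))).foldl (pvBestStep (fun k => PySem.Str.isIn k q)) a)
      = fun best cv => cv.2.foldl (pvScanWord q cv.1) best := by
    funext a cv
    rw [List.foldl_map]
    congr 1
    funext b kw
    exact (pv_scan_eq q cv.1 b kw).symm
  rw [hstep]

set_option maxRecDepth 100000 in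
theorem pv_items : pvCategoryMapping.items = pvCM := by decide

set_option maxRecDepth 100000 in
theorem pv_keys : pvCategoryMapping.keys = pvCM.map Prod.fst := by decide

theorem pv_keys_nodup : (pvCM.map Prod.fst).Nodup := by decide

theorem pv_len_lt : ∀ kv ∈ pvCM, PySem.Str.len kv.1 < 16 := by decide

-- per-length-class stability: for every length, the sorted key list and the original key list
-- carry the same keywords of that length, in the same order (a fact about the fixed literal list)
theorem pv_class : ∀ n : Nat, n < 16 →
    (PySem.List.sorted (pvCM.map Prod.fst) (fun k => PySem.Str.len k) true).filter
        (fun k => PySem.Str.len k == (n : Int))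
      = (pvCM.map Prod.fst).filter (fun k => PySem.Str.len k == (n : Int)) := by
  decide

theorem pv_len_nonneg (s : String) : 0 ≤ PySem.Str.len s := by
  simp [PySem.Str.len_eq]

-- a guarded fold of pvBestStep over the full list is the unguarded fold over the filtered list
theorem pv_fold_filter (p : String → Bool) (L : List (String × Int)) :
    ∀ (acc : Option (String × Int)),
      L.foldl (pvBestStep p) acc
        = (L.filter (fun kv => p kv.1)).foldl (pvBestStep (fun _ => true)) acc := by
  induction L with
  | nil => intro acc; rfl
  | cons kv L ih =>
    intro acc
    by_cases h : p kv.1 = true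
    · simp [h, List.foldl_cons, ih, pvBestStep]
    · simp only [Bool.not_eq_true] at h
      simp [h, List.foldl_cons, ih, pvBestStep]

-- once the accumulator holds a pair at least as long as everything to come, it never changes
theorem pv_fold_keep (F : List (String × Int)) :
    ∀ (b : String × Int),
      (∀ kv ∈ F, PySem.Str.len kv.1 ≤ PySem.Str.len b.1) →
      F.foldl (pvBestStep (fun _ => true)) (some b) = some b := by
  induction F with
  | nil => intro b _; rfl
  | cons kv F ih =>
    intro b hb
    have h1 : PySem.Str.len kv.1 ≤ PySem.Str.len b.1 := hb kv (by simp)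
    have hstep : pvBestStep (fun _ => true) (some b) kv = some b := by
      have hn : ¬ PySem.Str.len b.1 < PySem.Str.len kv.1 := not_lt.mpr h1
      simp only [pvBestStep, if_true]
      rw [if_neg hn]
    rw [List.foldl_cons, hstep]
    exact ih b (fun j hj => hb j (by simp [hj]))

-- the unguarded fold returns the first pair whose key attains the maximal length M
theorem pv_fold_max (F : List (String × Int)) :
    ∀ (M : Int) (acc : Option (String × Int)) (pr : String × Int),
      (∀ kv ∈ F, PySem.Str.len kv.1 ≤ M) →
      (∀ b, acc = some b → PySem.Str.len b.1 < M) →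
      F.find? (fun kv => PySem.Str.len kv.1 == M) = some pr →
      F.foldl (pvBestStep (fun _ => true)) acc = some pr := by
  induction F with
  | nil => intro M acc pr _ _ h; simp at h
  | cons kv F ih =>
    intro M acc pr hle hacc hfind
    by_cases hM : PySem.Str.len kv.1 = M
    · have hcond : (PySem.Str.len kv.1 == M) = true := beq_iff_eq.mpr hM
      have hpr : pr = kv := by
        simp only [List.find?_cons, hcond] at hfind
        exact (Option.some_inj.mp hfind).symm
      have hstep : pvBestStep (fun _ => true) acc kv = some kv := by
        cases acc with
        | none => rfl
        | some b =>
          have hblt : PySem.Str.len b.1 < PySem.Str.len kv.1 := by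
            have := hacc b rfl; omega
          simp only [pvBestStep, if_true]
          rw [if_pos hblt]
      rw [List.foldl_cons, hstep, hpr]
      exact pv_fold_keep F kv (fun j hj => le_trans (hle j (by simp [hj])) (le_of_eq hM.symm))
    · have hcond : (PySem.Str.len kv.1 == M) = false := beq_eq_false_iff_ne.mpr hM
      have hfind' : F.find? (fun kv => PySem.Str.len kv.1 == M) = some pr := by
        simpa only [List.find?_cons, hcond] using hfind
      have hlt : PySem.Str.len kv.1 < M :=
        lt_of_le_of_ne (hle kv (by simp)) hM
      rw [List.foldl_cons]
      apply ih M _ pr (fun j hj => hle j (by simp [hj])) _ hfind'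
      intro b hb
      cases acc with
      | none =>
        simp [pvBestStep] at hb
        rw [← hb]; exact hlt
      | some c =>
        have hc := hacc c rfl
        simp only [pvBestStep, if_true] at hb
        split at hb <;> simp at hb <;> rw [← hb]
        · exact hlt
        · exact hc

-- CORE: the head of a length-descending, per-length-class stable list T is exactly the
-- running-longest fold over F (B's loop), together with membership of the winning pair
theorem pv_core (T : List String) (F : List (String × Int))
    (hT : T.Pairwise (fun a b => PySem.Str.len b ≤ PySem.Str.len a))
    (hTN : ∀ k ∈ T, PySem.Str.len k < 16)
    (hFN : ∀ kv ∈ F, PySem.Str.len kv.1 < 16)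
    (hclass : ∀ n : Nat, n < 16 →
        T.filter (fun k => PySem.Str.len k == (n : Int))
          = (F.map Prod.fst).filter (fun k => PySem.Str.len k == (n : Int))) :
    (T.head? = none ∧ F.foldl (pvBestStep (fun _ => true)) none = none) ∨
    (∃ t v, T.head? = some t ∧ F.foldl (pvBestStep (fun _ => true)) none = some (t, v) ∧ (t, v) ∈ F) := by
  have hmem : ∀ kv ∈ F, kv.1 ∈ T := by
    intro kv hkv
    have h0 := pv_len_nonneg kv.1
    have hlt := hFN kv hkv
    have hn : ((PySem.Str.len kv.1).toNat : Int) = PySem.Str.len kv.1 := Int.toNat_of_nonneg h0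
    have hcl := hclass (PySem.Str.len kv.1).toNat (by omega)
    rw [hn] at hcl
    have hin : kv.1 ∈ (F.map Prod.fst).filter (fun k => PySem.Str.len k == PySem.Str.len kv.1) := by
      simp [List.mem_filter]
      exact ⟨kv.2, hkv⟩
    rw [← hcl] at hin
    exact List.mem_of_mem_filter hin
  cases hTeq : T with
  | nil =>
    left
    have hFnil : F = [] := by
      cases hFeq : F with
      | nil => rfl
      | cons kv F' =>
        exfalso
        have := hmem kv (by simp [hFeq])
        simp [hTeq] at this
    simp [hFnil]
  | cons t T' =>
    right
    have htT : t ∈ T := by simp [hTeq]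
    have hTle : ∀ k ∈ T, PySem.Str.len k ≤ PySem.Str.len t := by
      intro k hk
      rw [hTeq] at hk
      rcases List.mem_cons.mp hk with h | h
      · exact le_of_eq (by rw [h])
      · rw [hTeq] at hT
        exact (List.pairwise_cons.mp hT).1 k h
    have hFle : ∀ kv ∈ F, PySem.Str.len kv.1 ≤ PySem.Str.len t :=
      fun kv hkv => hTle kv.1 (hmem kv hkv)
    have h0 := pv_len_nonneg t
    have hlt16 := hTN t htT
    have hn : ((PySem.Str.len t).toNat : Int) = PySem.Str.len t := Int.toNat_of_nonneg h0
    have hcl := hclass (PySem.Str.len t).toNat (by omega)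
    rw [hn] at hcl
    -- the class of t in T starts with t, hence so does the class in F.map fst
    have hTclass : T.filter (fun k => PySem.Str.len k == PySem.Str.len t)
        = t :: T'.filter (fun k => PySem.Str.len k == PySem.Str.len t) := by
      rw [hTeq, List.filter_cons, if_pos (by simp)]
    have hfindmap : (F.map Prod.fst).find? (fun k => PySem.Str.len k == PySem.Str.len t) = some t := by
      rw [← List.head?_filter, ← hcl, hTclass]
      rfl
    rw [List.find?_map] at hfindmap
    rcases Option.map_eq_some_iff.mp hfindmap with ⟨pr, hpr, hpr1⟩
    have hfind : F.find? (fun kv => PySem.Str.len kv.1 == PySem.Str.len t) = some pr := hpr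
    refine ⟨t, pr.2, rfl, ?_, ?_⟩
    · have := pv_fold_max F (PySem.Str.len t) none pr hFle (by intro b hb; cases hb) hfind
      rw [this, ← hpr1]
    · have := List.mem_of_find?_eq_some hfind
      rw [← hpr1]
      simpa using this

-- the filtered pair list projects to the filtered key list
theorem pv_map_filter (p : String → Bool) (L : List (String × Int)) :
    (L.filter (fun kv => p kv.1)).map Prod.fst = (L.map Prod.fst).filter p := by
  rw [List.filter_map]
  rfl

-- ===== VERDICT (by name: the statement is the Claim_ definition above) =====
theorem get_category_from_query_py_spec : Claim_equal_get_category_from_query_py := by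
  intro query _
  unfold Spec_get_category_from_query_py
  unfold get_category_from_query_py
  simp only [get_category_from_query_py_alt]
  rw [pv_keys, pv_nested]
  set p : String → Bool := fun keyword => PySem.Str.isIn keyword (PySem.Str.lower query) with hp
  set S : List String := PySem.List.sorted (pvCM.map Prod.fst) (fun k => PySem.Str.len k) true with hS
  set F : List (String × Int) := pvCM.filter (fun kv => p kv.1) with hF
  have hfold := pv_fold_filter p pvCM none
  have hcore := pv_core (S.filter p) F
    (List.Pairwise.sublist List.filter_sublist
      (PySem.List.sorted_pairwise_rev (pvCM.map Prod.fst) (fun k => PySem.Str.len k)))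
    (by
      intro k hk
      have hkS : k ∈ S := List.mem_of_mem_filter hk
      have : k ∈ pvCM.map Prod.fst := (PySem.List.mem_sorted _ _ _ _).mp hkS
      rcases List.mem_map.mp this with ⟨kv, hkv, hkv1⟩
      rw [← hkv1]; exact pv_len_lt kv hkv)
    (by
      intro kv hkv
      exact pv_len_lt kv (List.mem_of_mem_filter hkv))
    (by
      intro n hn
      rw [List.filter_comm, pv_class n hn, ← List.filter_comm, pv_map_filter])
  have hfindT : S.find? p = (S.filter p).head? := (List.head?_filter).symm
  rcases hcore with ⟨h1, h2⟩ | ⟨t, v, h1, h2, h3⟩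
  · rw [hfindT, h1, hfold, ← hF, h2]
  · rw [hfindT, h1, hfold, ← hF, h2]
    have hmem : (t, v) ∈ pvCM := List.mem_of_mem_filter h3
    have hget : pvCategoryMapping.get? t = some v :=
      PySem.Dict.get?_of_mem_items pvCategoryMapping (by rw [pv_items]; exact hmem)
        (by rw [pv_keys]; exact pv_keys_nodup)
    simp [hget]
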